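-- pv_equiv track=rewrite | github.com/AstraZeneca/fragler | src/find_optimal_fragments.py | filter_nested_fragments
-- ===== SOURCE A (Python) =====
-- def filter_nested_fragments(strs, keep_largest=True):
--     """
--     Remove fragments which contain other fragments
--     so that only the longest nested string remains.
--     Can't find a better way to do it now - refactor.
--     """
--     strs = list(strs)
--     strs.sort()
--
--     inds_to_remove = []
--     for i, pattern in enumerate(strs):
--         for j, target in enumerate(strs):
--             if i != j and target.find(pattern) != -1:
--                 if keep_largest:
--                     inds_to_remove.append(i)
--                 else:
--                     inds_to_remove.append(j)
--     return [str for i, str in enumerate(strs) if i not in inds_to_remove]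
-- ===== SOURCE B (Python) =====
-- def proper_substrings(t):
--     """All substrings of t other than t itself (includes '' when t is nonempty)."""
--     n = len(t)
--     return {t[i:j] for i in range(n) for j in range(i, n + 1) if j - i < n}
--
-- def filter_nested_fragments(strs, keep_largest=True):
--     """Substring-index reimplementation: count duplicates once; with keep_largest
--     build one set of all proper substrings of the fragments and keep a fragment iff
--     it is unique and not in that set; otherwise keep a fragment iff it is unique and
--     none of its proper substrings is itself a fragment. No pairwise fragment scan."""
--     ordered = sorted(strs)
--     counts = {}
--     for s in ordered:
--         counts[s] = counts.get(s, 0) + 1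
--     if keep_largest:
--         subs = set()
--         for t in counts:
--             subs |= proper_substrings(t)
--         return [s for s in ordered if counts[s] == 1 and s not in subs]
--     keys = set(counts)
--     return [s for s in ordered
--             if counts[s] == 1 and not any(u in keys for u in proper_substrings(s))]
-- ===== Notes on version B (the rewrite author's own statement) =====
-- stated objective: faster
-- what changed: A scans all ordered pairs of fragments with str.find and collects indices to remove, then filters by repeated index-membership in that list; B never compares fragment pairs: it counts duplicates once and either builds one set of all proper substrings of the fragments and keeps a fragment iff it is unique and absent from that set (keep_largest), or keeps a fragment iff it is unique and none of its own proper substrings is itself a fragment.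
import Mathlib
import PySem

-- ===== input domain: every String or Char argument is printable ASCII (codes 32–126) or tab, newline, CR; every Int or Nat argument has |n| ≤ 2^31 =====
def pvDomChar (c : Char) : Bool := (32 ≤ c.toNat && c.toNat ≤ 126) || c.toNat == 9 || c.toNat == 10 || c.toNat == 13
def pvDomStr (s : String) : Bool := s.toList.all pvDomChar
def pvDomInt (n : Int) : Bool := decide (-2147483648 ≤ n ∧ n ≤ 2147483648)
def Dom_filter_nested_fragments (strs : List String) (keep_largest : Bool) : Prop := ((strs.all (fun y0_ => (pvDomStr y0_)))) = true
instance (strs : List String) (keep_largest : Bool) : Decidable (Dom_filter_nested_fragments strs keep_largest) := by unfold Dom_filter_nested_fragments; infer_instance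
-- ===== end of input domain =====

-- B replaces A's pairwise index scan (quadratic in the number of fragments) by a substring index:
-- count duplicates once, enumerate each fragment's proper substrings and use set membership instead
-- of comparing fragment pairs; objective: faster (measured).

-- ===== PORT A =====
def filter_nested_fragments (strs : List String) (keep_largest : Bool) : List String :=
  let strs2 := PySem.List.sorted strs (fun s => s) false
  let inds_to_remove : List Int :=
    (PySem.List.enumerate strs2).foldl (fun acc ip =>
      (PySem.List.enumerate strs2).foldl (fun acc2 jt =>
        if ip.1 != jt.1 && (PySem.Str.find jt.2 ip.2 != -1) then
          acc2 ++ [if keep_largest then ip.1 else jt.1]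
        else acc2) acc) []
  ((PySem.List.enumerate strs2).filter
    (fun ip => !(inds_to_remove.contains ip.1))).map (fun ip => ip.2)

-- ===== PORT B =====
-- transliteration of Source B's proper_substrings: the set comprehension
-- {t[i:j] for i in range(n) for j in range(i, n+1) if j-i < n}
def pyProperSubstrings (t : String) : PySem.Set String :=
  PySem.Set.ofList
    ((PySem.List.pyRange 0 (PySem.Str.len t) 1).flatMap (fun i =>
      (PySem.List.pyRange i (PySem.Str.len t + 1) 1).filterMap (fun j =>
        if j - i < PySem.Str.len t then some (PySem.Str.slice t (some i) (some j)) else none)))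

-- transliteration of Source B: counts dict, then either one set of all proper substrings of the
-- fragments (keep_largest) or a per-fragment lookup of its proper substrings in the fragment set
def filter_nested_fragments_alt (strs : List String) (keep_largest : Bool) : List String :=
  let ordered := PySem.List.sorted strs (fun s => s) false
  let counts : PySem.Dict String Int :=
    ordered.foldl (fun d s => d.insert s (d.getD s 0 + 1)) PySem.Dict.empty
  if keep_largest then
    let subs : PySem.Set String :=
      counts.keys.foldl (fun acc t => PySem.Set.union acc (pyProperSubstrings t)) PySem.Set.empty
    ordered.filter (fun s => counts.getD s 0 == 1 && !(PySem.Set.contains subs s))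
  else
    let keys : PySem.Set String := PySem.Set.ofList counts.keys
    ordered.filter (fun s => counts.getD s 0 == 1 &&
      !((pyProperSubstrings s).any (fun u => PySem.Set.contains keys u)))

-- ===== PRECONDITION & SPEC =====
def Spec_filter_nested_fragments (strs : List String) (keep_largest : Bool) (out : List String) : Prop := out = filter_nested_fragments_alt strs keep_largest
instance (strs : List String) (keep_largest : Bool) (out : List String) : Decidable (Spec_filter_nested_fragments strs keep_largest out) := by unfold Spec_filter_nested_fragments; infer_instance

-- ===== CLAIM (what is proved, stated in full; the proofs are below) =====
def Claim_equal_filter_nested_fragments : Prop := ∀ (strs : List String) (keep_largest : Bool), Dom_filter_nested_fragments strs keep_largest → Spec_filter_nested_fragments strs keep_largest (filter_nested_fragments strs keep_largest)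

-- ===== LEMMAS AND PROOFS =====

-- two equal values at distinct positions force count ≥ 2
lemma two_le_count_of_pair (L : List String) (i j : Nat) (hij : i < j) (hj : j < L.length)
    (heq : L[i]'(by omega) = L[j]) : 2 ≤ L.count L[j] := by
  have hsplit : L.count L[j] = (L.take j).count L[j] + (L.drop j).count L[j] := by
    rw [← List.count_append, List.take_append_drop]
  rw [List.drop_eq_getElem_cons hj, List.count_cons] at hsplit
  simp only [beq_self_eq_true, if_pos] at hsplit
  have hmem : L[j] ∈ L.take j := by
    have hgt : (L.take j)[i]'(by simp; omega) = L[i]'(by omega) := by simp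
    rw [← heq, ← hgt]
    exact List.getElem_mem _
  have hpos := List.count_pos_iff.mpr hmem
  omega

-- count ≥ 2 at a witnessed position ↔ a second, distinct position with the same value
lemma two_le_count_iff_other (L : List String) (k : Nat) (hk : k < L.length) :
    2 ≤ L.count L[k] ↔ ∃ j, ∃ _ : j < L.length, j ≠ k ∧ L[j]'(by assumption) = L[k] := by
  constructor
  · intro h2
    have hsplit : L.count L[k] = (L.take k).count L[k] + (L.drop k).count L[k] := by
      rw [← List.count_append, List.take_append_drop]
    rw [List.drop_eq_getElem_cons hk, List.count_cons] at hsplit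
    simp only [beq_self_eq_true, if_pos] at hsplit
    rcases Nat.lt_or_ge 0 ((L.take k).count L[k]) with hp | hp
    · obtain ⟨i, hi, hgi⟩ := List.mem_iff_getElem.mp (List.count_pos_iff.mp hp)
      have hik : i < k := by simp at hi; omega
      have hiL : i < L.length := by omega
      refine ⟨i, hiL, by omega, ?_⟩
      rw [← hgi]; simp
    · have hq : 0 < (L.drop (k + 1)).count L[k] := by omega
      obtain ⟨i, hi, hgi⟩ := List.mem_iff_getElem.mp (List.count_pos_iff.mp hq)
      have hiL : k + 1 + i < L.length := by simp at hi; omega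
      refine ⟨k + 1 + i, hiL, by omega, ?_⟩
      rw [← hgi]; simp
  · rintro ⟨j, hj, hjk, hv⟩
    rcases Nat.lt_or_ge j k with h | h
    · exact two_le_count_of_pair L j k h hk hv
    · have hkj : k < j := by omega
      have := two_le_count_of_pair L k j hkj hj hv.symm
      rwa [hv] at this

-- equal first components in an enumeration force equal elements
lemma enum_snd_eq (L : List String) (k : Int) (s s' : String)
    (h1 : (k, s) ∈ PySem.List.enumerate L 0) (h2 : (k, s') ∈ PySem.List.enumerate L 0) : s = s' := by
  obtain ⟨i, hi, hp⟩ := (PySem.List.mem_enumerate_iff L 0 _).mp h1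
  obtain ⟨i', hi', hp'⟩ := (PySem.List.mem_enumerate_iff L 0 _).mp h2
  have e1 : k = (i : Int) := by simpa using congrArg Prod.fst hp
  have e2 : k = (i' : Int) := by simpa using congrArg Prod.fst hp'
  have hii : i = i' := by omega
  have f1 : s = L[i] := by simpa using congrArg Prod.snd hp
  have f2 : s' = L[i'] := by simpa using congrArg Prod.snd hp'
  subst hii; rw [f1, f2]

-- the pair-of-indices condition at element (k, s) ↔ the count/distinct-value condition
lemma key_iff (L : List String) (k : Int) (s : String) (c : String → Bool)
    (hc : c s = true) (hmem : (k, s) ∈ PySem.List.enumerate L 0) :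
    (∃ jt ∈ PySem.List.enumerate L 0, jt.1 ≠ k ∧ c jt.2 = true) ↔
      (2 ≤ L.count s ∨ ∃ t ∈ L, t ≠ s ∧ c t = true) := by
  obtain ⟨k', hk', hpair⟩ := (PySem.List.mem_enumerate_iff L 0 _).mp hmem
  have hk : k = (k' : Int) := by simpa using congrArg Prod.fst hpair
  have hs : s = L[k'] := by simpa using congrArg Prod.snd hpair
  constructor
  · rintro ⟨jt, hjt, hne, hcjt⟩
    obtain ⟨j, hj, hjp⟩ := (PySem.List.mem_enumerate_iff L 0 _).mp hjt
    have hj1 : jt.1 = (j : Int) := by simpa using congrArg Prod.fst hjp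
    have hj2 : jt.2 = L[j] := by simpa using congrArg Prod.snd hjp
    by_cases hv : L[j] = s
    · left
      rw [hs]
      have hjk : j ≠ k' := by
        intro h; apply hne; rw [hj1, hk, h]
      exact (two_le_count_iff_other L k' hk').mpr ⟨j, hj, hjk, by rw [hv, hs]⟩
    · right
      exact ⟨L[j], List.getElem_mem _, hv, hj2 ▸ hcjt⟩
  · rintro (h2 | ⟨t, ht, hts, hct⟩)
    · obtain ⟨j, hj, hjk, hv⟩ := (two_le_count_iff_other L k' hk').mp (by rw [← hs]; exact h2)
      refine ⟨((j : Int), L[j]), (PySem.List.mem_enumerate_iff L 0 _).mpr ⟨j, hj, by simp⟩, ?_, ?_⟩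
      · rw [hk]; intro h; apply hjk
        have h' : (j : Int) = (k' : Int) := h
        exact_mod_cast h'
      · rw [hv, ← hs]; exact hc
    · obtain ⟨j, hj, hv⟩ := List.mem_iff_getElem.mp ht
      refine ⟨((j : Int), L[j]), (PySem.List.mem_enumerate_iff L 0 _).mpr ⟨j, hj, by simp⟩, ?_, ?_⟩
      · rw [hk]; intro hEq; apply hts
        have hEq' : (j : Int) = (k' : Int) := hEq
        have hjq : j = k' := by exact_mod_cast hEq'
        subst hjq
        rw [← hv, hs]
      · rw [hv]; exact hct

-- filtering the enumeration by a predicate that only depends on the element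
lemma filter_enum_map {α : Type} (L : List α) (s0 : Int) (p : Int × α → Bool) (q : α → Bool)
    (h : ∀ k s, (k, s) ∈ PySem.List.enumerate L s0 → p (k, s) = q s) :
    ((PySem.List.enumerate L s0).filter p).map (fun ip => ip.2) = L.filter q := by
  induction L generalizing s0 with
  | nil => simp [PySem.List.enumerate_nil]
  | cons x xs ih =>
    rw [PySem.List.enumerate_cons]
    have hx := h s0 x (by rw [PySem.List.enumerate_cons]; exact List.mem_cons_self ..)
    simp only [List.filter_cons, hx]
    have := ih (s0 + 1) (fun k s hm => h k s (by rw [PySem.List.enumerate_cons]; exact List.mem_cons_of_mem _ hm))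
    by_cases hq : q x = true
    · simp [hq, this]
    · simp [Bool.eq_false_iff.mpr hq, this]

-- s.find(pat) != -1 and pat in s agree, as Bools
lemma find_bne_eq_isIn (pat t : String) :
    (PySem.Str.find t pat != -1) = PySem.Str.isIn pat t := by
  by_cases hin : pat.toList <:+: t.toList
  · have h1 := (PySem.Str.find_ne_neg_one_iff t pat).mpr hin
    have h2 := (PySem.Str.isIn_iff_infix pat t).mpr hin
    rw [h2]
    exact bne_iff_ne.mpr h1
  · have h1 := (PySem.Str.find_eq_neg_one_iff t pat).mpr hin
    have h2 : PySem.Str.isIn pat t = false := by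
      rcases hb : PySem.Str.isIn pat t with _ | _
      · rfl
      · exact absurd ((PySem.Str.isIn_iff_infix pat t).mp hb) hin
    rw [h2, h1]
    decide

-- membership in A's removal list, characterised at an element (k, s) of the enumeration
lemma mem_inds_iff (L : List String) (kl : Bool) (k : Int) (s : String)
    (hmem : (k, s) ∈ PySem.List.enumerate L 0) :
    (k ∈ (PySem.List.enumerate L 0).flatMap (fun ip =>
        ((PySem.List.enumerate L 0).filter
          (fun jt => ip.1 != jt.1 && (PySem.Str.find jt.2 ip.2 != -1))).map
          (fun jt => if kl then ip.1 else jt.1))) ↔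
      (∃ jt ∈ PySem.List.enumerate L 0, jt.1 ≠ k ∧
        (if kl then PySem.Str.isIn s jt.2 else PySem.Str.isIn jt.2 s) = true) := by
  cases kl with
  | true =>
    simp only [if_true, List.mem_flatMap, List.mem_map, List.mem_filter, Bool.and_eq_true,
      bne_iff_ne]
    constructor
    · rintro ⟨ip, hip, jt, ⟨hjt, hne, hfind⟩, hval⟩
      have hip' : (k, ip.2) ∈ PySem.List.enumerate L 0 := by rw [← hval]; exact hip
      have hsnd : s = ip.2 := enum_snd_eq L k s ip.2 hmem hip'
      refine ⟨jt, hjt, by rw [← hval]; exact fun h => hne h.symm, ?_⟩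
      have hIn : PySem.Str.isIn ip.2 jt.2 = true := by
        rw [← find_bne_eq_isIn]; exact bne_iff_ne.mpr hfind
      rw [hsnd]; exact hIn
    · rintro ⟨jt, hjt, hne, hin⟩
      refine ⟨(k, s), hmem, jt, ⟨hjt, fun h => hne h.symm, ?_⟩, rfl⟩
      exact bne_iff_ne.mp ((find_bne_eq_isIn s jt.2).symm ▸ hin)
  | false =>
    simp only [List.mem_flatMap, List.mem_map, List.mem_filter, Bool.and_eq_true,
      bne_iff_ne]
    constructor
    · rintro ⟨ip, hip, jt, ⟨hjt, hne, hfind⟩, hval⟩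
      have hjt' : (k, jt.2) ∈ PySem.List.enumerate L 0 := by rw [← hval]; exact hjt
      have hsnd : s = jt.2 := enum_snd_eq L k s jt.2 hmem hjt'
      refine ⟨ip, hip, by rw [← hval]; exact hne, ?_⟩
      have hIn : PySem.Str.isIn ip.2 jt.2 = true := by
        rw [← find_bne_eq_isIn]; exact bne_iff_ne.mpr hfind
      rw [hsnd]; exact hIn
    · rintro ⟨ip, hip, hne, hin⟩
      refine ⟨ip, hip, (k, s), ⟨hmem, hne, ?_⟩, rfl⟩
      exact bne_iff_ne.mp ((find_bne_eq_isIn ip.2 s).symm ▸ hin)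

-- B's substring enumeration hits exactly the proper infixes
lemma mem_pyProperSubstrings (u t : String) :
    u ∈ pyProperSubstrings t ↔ (u.toList <:+: t.toList ∧ u ≠ t) := by
  unfold pyProperSubstrings
  rw [PySem.Set.mem_ofList, List.mem_flatMap]
  constructor
  · rintro ⟨i, hi, hu⟩
    rw [List.mem_filterMap] at hu
    obtain ⟨j, hj, hval⟩ := hu
    rw [PySem.List.mem_pyRange_one, PySem.Str.len_eq] at hi hj
    split_ifs at hval with hcond
    · rw [PySem.Str.len_eq] at hcond
      have hval' : u = PySem.Str.slice t (some i) (some j) := (Option.some_injective _ hval).symm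
      have htl : u.toList = List.take (j.toNat - i.toNat) (List.drop i.toNat t.toList) := by
        rw [hval']
        have hb : (PySem.Str.slice t (some i) (some j)).toList
            = PySem.List.slice t.toList (some i) (some j) := by simp [PySem.Str.slice]
        rw [hb, PySem.List.slice_toNat t.toList (by omega) (by omega)]
      constructor
      · rw [htl]
        exact ((List.take_prefix _ _).isInfix).trans ((List.drop_suffix _ _).isInfix)
      · intro hut
        have hlen : u.toList.length < t.toList.length := by
          rw [htl]
          simp only [List.length_take, List.length_drop]
          omega
        rw [hut] at hlen
        omega
  · rintro ⟨hinf, hne⟩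
    have hmlt : u.toList.length < t.toList.length := by
      rcases Nat.lt_or_ge u.toList.length t.toList.length with h | h
      · exact h
      · exact absurd (String.toList_inj.mp
          (hinf.eq_of_length (Nat.le_antisymm hinf.length_le h))) hne
    obtain ⟨pre, suf, heq⟩ := hinf
    have hlen : t.toList.length = pre.length + u.toList.length + suf.length := by
      have h := congrArg List.length heq
      simp only [List.length_append] at h
      omega
    by_cases hm : u.toList.length = 0
    · have hu0 : u.toList = [] := List.length_eq_zero_iff.mp hm
      refine ⟨0, ?_, ?_⟩
      · rw [PySem.List.mem_pyRange_one, PySem.Str.len_eq]; omega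
      · rw [List.mem_filterMap]
        refine ⟨0, ?_, ?_⟩
        · rw [PySem.List.mem_pyRange_one, PySem.Str.len_eq]; omega
        · rw [if_pos (by rw [PySem.Str.len_eq]; omega)]
          have hb : (PySem.Str.slice t (some 0) (some 0)).toList
              = PySem.List.slice t.toList (some 0) (some 0) := by simp [PySem.Str.slice]
          have : PySem.Str.slice t (some 0) (some 0) = u := by
            apply String.toList_inj.mp
            rw [hb, PySem.List.slice_toNat t.toList (le_refl 0) (le_refl 0), hu0]
            simp
          rw [this]
    · refine ⟨(pre.length : Int), ?_, ?_⟩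
      · rw [PySem.List.mem_pyRange_one, PySem.Str.len_eq]; omega
      · rw [List.mem_filterMap]
        refine ⟨(pre.length : Int) + (u.toList.length : Int), ?_, ?_⟩
        · rw [PySem.List.mem_pyRange_one, PySem.Str.len_eq]; omega
        · rw [if_pos (by rw [PySem.Str.len_eq]; omega)]
          have hb : (PySem.Str.slice t (some (pre.length : Int))
                (some ((pre.length : Int) + (u.toList.length : Int)))).toList
              = PySem.List.slice t.toList (some (pre.length : Int))
                (some ((pre.length : Int) + (u.toList.length : Int))) := by
            simp [PySem.Str.slice]
          have hv : PySem.Str.slice t (some (pre.length : Int))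
              (some ((pre.length : Int) + (u.toList.length : Int))) = u := by
            apply String.toList_inj.mp
            rw [hb, PySem.List.slice_natCast_add, ← heq, List.append_assoc, List.drop_left,
              List.take_left]
          rw [hv]

-- membership in B's folded union of substring sets
lemma mem_foldl_union (l : List String) (acc : PySem.Set String) (u : String) :
    u ∈ l.foldl (fun acc t => PySem.Set.union acc (pyProperSubstrings t)) acc ↔
      u ∈ acc ∨ ∃ t ∈ l, u ∈ pyProperSubstrings t := by
  induction l generalizing acc with
  | nil => simp
  | cons x xs ih =>
    rw [List.foldl_cons, ih, PySem.Set.mem_union]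
    constructor
    · rintro (((h | h) | ⟨t, ht, hu⟩))
      · exact Or.inl h
      · exact Or.inr ⟨x, List.mem_cons_self .., h⟩
      · exact Or.inr ⟨t, List.mem_cons_of_mem _ ht, hu⟩
    · rintro (h | ⟨t, ht, hu⟩)
      · exact Or.inl (Or.inl h)
      · rcases List.mem_cons.mp ht with rfl | ht'
        · exact Or.inl (Or.inr hu)
        · exact Or.inr ⟨t, ht', hu⟩

-- B's keep test (keep_largest branch), characterised
lemma altKeep_true_iff (L : List String) (s : String) (hs : s ∈ L) :
    (((L.foldl (fun d x => d.insert x (d.getD x 0 + 1)) (PySem.Dict.empty : PySem.Dict String Int)).getD s 0 == 1) &&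
      !(PySem.Set.contains
          ((L.foldl (fun d x => d.insert x (d.getD x 0 + 1)) (PySem.Dict.empty : PySem.Dict String Int)).keys.foldl
            (fun acc t => PySem.Set.union acc (pyProperSubstrings t)) PySem.Set.empty) s)) = true ↔
      ¬(2 ≤ L.count s ∨ ∃ t ∈ L, t ≠ s ∧ PySem.Str.isIn s t = true) := by
  have hcount : (L.foldl (fun d x => d.insert x (d.getD x 0 + 1)) (PySem.Dict.empty : PySem.Dict String Int)).getD s 0
      = (L.count s : Int) := by
    rw [PySem.Dict.getD_foldl_insert_add_one, PySem.Dict.getD_empty]; ring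
  have hkeys : (L.foldl (fun d x => d.insert x (d.getD x 0 + 1)) (PySem.Dict.empty : PySem.Dict String Int)).keys
      = PySem.Set.ofList L := by
    rw [PySem.Dict.keys_foldl_insert, PySem.Dict.keys_empty, PySem.Set.update_nil_left]
  have hpos : 0 < L.count s := List.count_pos_iff.mpr hs
  rw [Bool.and_eq_true, Bool.not_eq_true', hcount, hkeys]
  rw [beq_iff_eq, ← Bool.not_eq_true, PySem.Set.contains_iff, mem_foldl_union]
  simp only [PySem.Set.mem_ofList, mem_pyProperSubstrings, PySem.Str.isIn_iff_infix,
    not_or]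
  constructor
  · rintro ⟨h1, -, h3⟩
    have hc : L.count s = 1 := by exact_mod_cast h1
    refine ⟨by omega, ?_⟩
    rintro ⟨t, ht, hts, hinf⟩
    exact h3 ⟨t, ht, hinf, fun h => hts h.symm⟩
  · rintro ⟨h1, h2⟩
    have hc : L.count s = 1 := by omega
    refine ⟨by exact_mod_cast hc, by simp [PySem.Set.empty], ?_⟩
    rintro ⟨t, ht, hinf, hst⟩
    exact h2 ⟨t, ht, fun h => hst h.symm, hinf⟩

-- B's keep test (not keep_largest branch), characterised
lemma altKeep_false_iff (L : List String) (s : String) (hs : s ∈ L) :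
    (((L.foldl (fun d x => d.insert x (d.getD x 0 + 1)) (PySem.Dict.empty : PySem.Dict String Int)).getD s 0 == 1) &&
      !((pyProperSubstrings s).any (fun u => PySem.Set.contains
          (PySem.Set.ofList (L.foldl (fun d x => d.insert x (d.getD x 0 + 1)) (PySem.Dict.empty : PySem.Dict String Int)).keys)
          u))) = true ↔
      ¬(2 ≤ L.count s ∨ ∃ t ∈ L, t ≠ s ∧ PySem.Str.isIn t s = true) := by
  have hcount : (L.foldl (fun d x => d.insert x (d.getD x 0 + 1)) (PySem.Dict.empty : PySem.Dict String Int)).getD s 0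
      = (L.count s : Int) := by
    rw [PySem.Dict.getD_foldl_insert_add_one, PySem.Dict.getD_empty]; ring
  have hkeys : (L.foldl (fun d x => d.insert x (d.getD x 0 + 1)) (PySem.Dict.empty : PySem.Dict String Int)).keys
      = PySem.Set.ofList L := by
    rw [PySem.Dict.keys_foldl_insert, PySem.Dict.keys_empty, PySem.Set.update_nil_left]
  have hpos : 0 < L.count s := List.count_pos_iff.mpr hs
  rw [Bool.and_eq_true, Bool.not_eq_true', hcount, hkeys]
  rw [beq_iff_eq, ← Bool.not_eq_true, List.any_eq_true]
  simp only [PySem.Set.contains_iff, PySem.Set.mem_ofList, PySem.Set.mem_ofList,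
    PySem.Str.isIn_iff_infix, not_or]
  constructor
  · rintro ⟨h1, h2⟩
    refine ⟨by omega, ?_⟩
    rintro ⟨t, ht, hts, hinf⟩
    exact h2 ⟨t, (mem_pyProperSubstrings t s).mpr ⟨hinf, hts⟩, ht⟩
  · rintro ⟨h1, h2⟩
    refine ⟨by omega, ?_⟩
    rintro ⟨u, hu, huL⟩
    obtain ⟨hinf, hus⟩ := (mem_pyProperSubstrings u s).mp hu
    exact h2 ⟨u, huL, hus, hinf⟩

-- elements of the enumeration are elements of the list
lemma snd_mem_of_mem_enum (L : List String) (k : Int) (s : String)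
    (hmem : (k, s) ∈ PySem.List.enumerate L 0) : s ∈ L := by
  obtain ⟨i, hi, hp⟩ := (PySem.List.mem_enumerate_iff L 0 _).mp hmem
  have : s = L[i] := by simpa using congrArg Prod.snd hp
  rw [this]
  exact List.getElem_mem _

-- ===== VERDICT (by name: the statement is the Claim_ definition above) =====
theorem filter_nested_fragments_spec : Claim_equal_filter_nested_fragments := by
  unfold Claim_equal_filter_nested_fragments
  intro strs keep_largest _
  unfold Spec_filter_nested_fragments filter_nested_fragments filter_nested_fragments_alt
  simp only [PySem.List.foldl_append_if, PySem.List.foldl_append_eq_flatMap, List.nil_append]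
  cases keep_largest with
  | true =>
    simp only [if_true]
    apply filter_enum_map
    intro k s hmem
    have hs := snd_mem_of_mem_enum _ k s hmem
    rw [Bool.eq_iff_iff, Bool.not_eq_true', ← Bool.not_eq_true, List.contains_iff_mem]
    rw [altKeep_true_iff _ s hs]
    exact not_congr (Iff.trans (mem_inds_iff _ true k s hmem)
      (key_iff _ k s (fun t => PySem.Str.isIn s t)
        ((PySem.Str.isIn_iff_infix s s).mpr (List.infix_refl _)) hmem))
  | false =>
    rw [if_neg Bool.false_ne_true]
    apply filter_enum_map
    intro k s hmem
    have hs := snd_mem_of_mem_enum _ k s hmem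
    rw [Bool.eq_iff_iff, Bool.not_eq_true', ← Bool.not_eq_true, List.contains_iff_mem]
    rw [altKeep_false_iff _ s hs]
    exact not_congr (Iff.trans (mem_inds_iff _ false k s hmem)
      (key_iff _ k s (fun t => PySem.Str.isIn t s)
        ((PySem.Str.isIn_iff_infix s s).mpr (List.infix_refl _)) hmem))
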